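-- pv_equiv track=rewrite | github.com/mahmood726-cyber/rapidmeta-finerenone | propagate_features.py | extract_block_inclusive
-- ===== SOURCE A (Python) =====
-- def extract_block_inclusive(source_lines, start_marker, end_marker):
--     """Extract lines between start_marker and end_marker (inclusive of both)."""
--     start_idx = None
--     for i, line in enumerate(source_lines):
--         if start_marker in line and start_idx is None:
--             start_idx = i
--         if end_marker in line and start_idx is not None and i > start_idx:
--             return source_lines[start_idx:i+1]
--     return None
-- ===== SOURCE B (Python) =====
-- def extract_block_inclusive(source_lines, start_marker, end_marker):
--     """Extract lines between start_marker and end_marker (inclusive of both)."""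
--     starts = [i for i, line in enumerate(source_lines) if start_marker in line]
--     ends = [i for i, line in enumerate(source_lines) if end_marker in line]
--     if not starts:
--         return None
--     s = starts[0]
--     later_ends = [e for e in ends if e > s]
--     if not later_ends:
--         return None
--     return source_lines[s:later_ends[0] + 1]
-- ===== Notes on version B (the rewrite author's own statement) =====
-- stated objective: alternative
-- what changed: Instead of A's single stateful scan with an Optional start_idx flag and an i>start_idx guard, B materialises the full index tables of lines containing each marker as two lists, then selects the block purely arithmetically: first start index, first end index greater than it, one slice.
import Mathlib
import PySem

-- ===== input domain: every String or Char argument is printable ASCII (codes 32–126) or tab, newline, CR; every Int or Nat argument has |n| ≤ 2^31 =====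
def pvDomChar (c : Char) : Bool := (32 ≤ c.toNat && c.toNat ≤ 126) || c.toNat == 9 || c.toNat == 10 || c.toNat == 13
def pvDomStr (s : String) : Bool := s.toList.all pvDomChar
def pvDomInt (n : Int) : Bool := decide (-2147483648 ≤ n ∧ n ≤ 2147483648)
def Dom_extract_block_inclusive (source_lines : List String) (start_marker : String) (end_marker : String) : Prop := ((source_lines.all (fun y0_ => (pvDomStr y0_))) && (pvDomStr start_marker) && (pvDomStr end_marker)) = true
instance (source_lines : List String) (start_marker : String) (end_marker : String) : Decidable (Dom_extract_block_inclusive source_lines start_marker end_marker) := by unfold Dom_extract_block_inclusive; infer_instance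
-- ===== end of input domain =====

-- B replaces A's single stateful scan (Optional start_idx flag + i>start_idx guard) by
-- materialising the two full marker-index tables and selecting the block arithmetically; alternative decomposition, same cost.


-- ===== PORT A =====
-- A's for-loop over enumerate(source_lines) with mutable state start_idx : Option Nat;
-- `start_marker in line` is PySem.Str.isIn, the slice source_lines[start_idx:i+1] is PySem.List.slice.
def extract_block_inclusive_loopA (all : List String) (start_marker end_marker : String) :
    List String → Nat → Option Nat → Option (List String)
  | [], _, _ => none
  | line :: rest, i, start_idx =>
      -- first if: set start_idx on first line containing start_marker
      let start_idx' : Option Nat :=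
        if PySem.Str.isIn start_marker line && start_idx.isNone then some i else start_idx
      -- second if: end_marker in line and start_idx is not None and i > start_idx → return slice
      match start_idx' with
      | some s =>
          if PySem.Str.isIn end_marker line && decide (s < i) then
            some (PySem.List.slice all (some (s : Int)) (some ((i : Int) + 1)))
          else extract_block_inclusive_loopA all start_marker end_marker rest (i + 1) (some s)
      | none => extract_block_inclusive_loopA all start_marker end_marker rest (i + 1) none

def extract_block_inclusive (source_lines : List String) (start_marker : String) (end_marker : String) : Option (List String) :=
  extract_block_inclusive_loopA source_lines start_marker end_marker source_lines 0 none

-- ===== PORT B =====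
-- [i for i, line in enumerate(xs, base) if marker in line]  (the index-table comprehension)
def pvIndices (marker : String) : List String → Nat → List Nat
  | [], _ => []
  | line :: rest, i =>
      if PySem.Str.isIn marker line then i :: pvIndices marker rest (i + 1)
      else pvIndices marker rest (i + 1)

def extract_block_inclusive_alt (source_lines : List String) (start_marker : String) (end_marker : String) : Option (List String) :=
  let starts := pvIndices start_marker source_lines 0
  let ends := pvIndices end_marker source_lines 0
  match starts.head? with
  | none => none                                   -- if not starts: return None
  | some s =>
      let later_ends := ends.filter (fun e => decide (s < e))
      match later_ends.head? with
      | none => none                               -- if not later_ends: return None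
      | some e => some (PySem.List.slice source_lines (some (s : Int)) (some ((e : Int) + 1)))

-- ===== PRECONDITION & SPEC =====
def Spec_extract_block_inclusive (source_lines : List String) (start_marker : String) (end_marker : String) (out : Option (List String)) : Prop := out = extract_block_inclusive_alt source_lines start_marker end_marker
instance (source_lines : List String) (start_marker : String) (end_marker : String) (out : Option (List String)) : Decidable (Spec_extract_block_inclusive source_lines start_marker end_marker out) := by unfold Spec_extract_block_inclusive; infer_instance

-- ===== CLAIM (what is proved, stated in full; the proofs are below) =====
def Claim_equal_extract_block_inclusive : Prop := ∀ (source_lines : List String) (start_marker : String) (end_marker : String), Dom_extract_block_inclusive source_lines start_marker end_marker → Spec_extract_block_inclusive source_lines start_marker end_marker (extract_block_inclusive source_lines start_marker end_marker)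

-- ===== LEMMAS AND PROOFS =====

-- Proof-only helper: first index ≥ base whose line contains marker.
def pvFindFrom (marker : String) : List String → Nat → Option Nat
  | [], _ => none
  | line :: rest, base =>
      if PySem.Str.isIn marker line then some base else pvFindFrom marker rest (base + 1)

theorem pvFindFrom_ge (marker : String) :
    ∀ (xs : List String) (base s : Nat), pvFindFrom marker xs base = some s → base ≤ s := by
  intro xs
  induction xs with
  | nil => intro base s h; simp [pvFindFrom] at h
  | cons line rest ih =>
      intro base s h
      simp only [pvFindFrom] at h
      split at h
      · simp only [Option.some.injEq] at h; omega
      · have := ih (base + 1) s h; omega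

-- The head of the index table is the first match.
theorem head?_pvIndices (marker : String) :
    ∀ (xs : List String) (base : Nat), (pvIndices marker xs base).head? = pvFindFrom marker xs base := by
  intro xs
  induction xs with
  | nil => intro base; simp [pvIndices, pvFindFrom]
  | cons line rest ih =>
      intro base
      simp only [pvIndices, pvFindFrom]
      split
      · rfl
      · exact ih (base + 1)

theorem pvIndices_mem_ge (marker : String) :
    ∀ (xs : List String) (base e : Nat), e ∈ pvIndices marker xs base → base ≤ e := by
  intro xs
  induction xs with
  | nil => intro base e h; simp [pvIndices] at h
  | cons line rest ih =>
      intro base e h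
      simp only [pvIndices] at h
      split at h
      · rcases List.mem_cons.mp h with h | h
        · omega
        · have := ih (base + 1) e h; omega
      · have := ih (base + 1) e h; omega

-- Filtering the end table by e > s is the index table of the tail dropped past s.
theorem filter_pvIndices (marker : String) (s : Nat) :
    ∀ (xs : List String) (base : Nat), base ≤ s + 1 →
      (pvIndices marker xs base).filter (fun e => decide (s < e)) =
        pvIndices marker (xs.drop (s + 1 - base)) (s + 1) := by
  intro xs
  induction xs with
  | nil => intro base _; simp [pvIndices]
  | cons line rest ih =>
      intro base hbase
      by_cases hb : base = s + 1
      · subst hb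
        simp only [Nat.sub_self, List.drop_zero]
        apply List.filter_eq_self.mpr
        intro e he
        have := pvIndices_mem_ge marker (line :: rest) (s + 1) e he
        simp; omega
      · have hle : base ≤ s := by omega
        have hdrop : (line :: rest).drop (s + 1 - base) = rest.drop (s + 1 - (base + 1)) := by
          have : s + 1 - base = (s + 1 - (base + 1)) + 1 := by omega
          rw [this]; rfl
        rw [hdrop]
        simp only [pvIndices]
        split
        · rw [List.filter_cons]
          have : ¬ (s < base) := by omega
          simp only [this, decide_false]
          exact ih (base + 1) (by omega)
        · exact ih (base + 1) (by omega)

-- Phase 2: once start_idx = some s is set (and i > s from then on), A's loop is a plain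
-- search for the first line ≥ i containing end_marker.
theorem loopA_some (all : List String) (sm em : String) :
    ∀ (rest : List String) (i s : Nat), s < i →
      extract_block_inclusive_loopA all sm em rest i (some s) =
        match pvFindFrom em rest i with
        | none => none
        | some e => some (PySem.List.slice all (some (s : Int)) (some ((e : Int) + 1))) := by
  intro rest
  induction rest with
  | nil => intro i s _; simp [extract_block_inclusive_loopA, pvFindFrom]
  | cons line r ih =>
      intro i s hsi
      simp only [extract_block_inclusive_loopA, pvFindFrom, Option.isNone_some, Bool.and_false]
      by_cases hin : PySem.Chars.isIn em.toList line.toList = true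
      · simp [PySem.Str.isIn, hin, hsi]
      · simp only [PySem.Str.isIn, hin, Bool.false_and, Bool.false_eq_true, if_false]
        exact ih (i + 1) s (by omega)

-- Phase 1: with start_idx = none, A's loop first searches for start_marker (no return can
-- fire before then, since i > start_idx fails on the line that sets it), then is phase 2.
theorem loopA_none (all : List String) (sm em : String) :
    ∀ (rest : List String) (i : Nat),
      extract_block_inclusive_loopA all sm em rest i none =
        match pvFindFrom sm rest i with
        | none => none
        | some s =>
            match pvFindFrom em (rest.drop (s + 1 - i)) (s + 1) with
            | none => none
            | some e => some (PySem.List.slice all (some (s : Int)) (some ((e : Int) + 1))) := by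
  intro rest
  induction rest with
  | nil => intro i; simp [extract_block_inclusive_loopA, pvFindFrom]
  | cons line r ih =>
      intro i
      by_cases hin : PySem.Str.isIn sm line = true
      · simp only [extract_block_inclusive_loopA, pvFindFrom, hin, Option.isNone_none,
          Bool.and_true, if_true, lt_irrefl, decide_false, Bool.and_false]
        rw [loopA_some all sm em r (i + 1) i (by omega)]
        simp
      · simp only [extract_block_inclusive_loopA, pvFindFrom, hin, Bool.false_and]
        rw [ih (i + 1)]
        cases hfs : pvFindFrom sm r (i + 1) with
        | none => simp
        | some s =>
            have hge := pvFindFrom_ge sm r (i + 1) s hfs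
            have hdrop : (line :: r).drop (s + 1 - i) = r.drop (s + 1 - (i + 1)) := by
              have : s + 1 - i = (s + 1 - (i + 1)) + 1 := by omega
              rw [this]; rfl
            simp [hdrop]

-- ===== VERDICT (by name: the statement is the Claim_ definition above) =====
theorem extract_block_inclusive_spec : Claim_equal_extract_block_inclusive := by
  intro source_lines sm em _
  show extract_block_inclusive source_lines sm em = extract_block_inclusive_alt source_lines sm em
  unfold extract_block_inclusive extract_block_inclusive_alt
  rw [loopA_none source_lines sm em source_lines 0]
  dsimp only
  rw [head?_pvIndices sm source_lines 0]
  cases hfs : pvFindFrom sm source_lines 0 with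
  | none => simp
  | some s =>
      simp only
      rw [filter_pvIndices em s source_lines 0 (by omega), head?_pvIndices]
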